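-- pv_equiv track=rewrite | github.com/rxn4chemistry/rxn-chemutils | src/rxn/chemutils/extended_reaction_smiles.py | fragment_group
-- ===== SOURCE A (Python) =====
-- from typing import List, Tuple
--
-- def fragment_group(
--     compounds: List[str], offset: int
-- ) -> Tuple[List[str], List[List[int]]]:
--     """
--     Converts a group of molecules, some of which possibly are composed of several fragments,
--     to the list of SMILES to put in the final reaction SMILES, and a list of groups of molecules
--     belonging together.
--
--     Example:
--         ['O', '[Na+].[OH-]'] -> (['O', '[Na+]', '[OH-]'], [[1, 2]])
--
--     Args:
--         compounds: SMILES string for molecules of the same group (f.i. reactants)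
--         offset: index, in the final reaction SMILES, of the first molecule of that group
--     """
--
--     smiles_list: List[str] = []
--     groups: List[List[int]] = []
--
--     current_index = offset
--     for c in compounds:
--         molecules = c.split(".")
--         smiles_list.extend(molecules)
--
--         number_fragments = len(molecules)
--         if number_fragments > 1:
--             groups.append(
--                 list(range(current_index, current_index + number_fragments))
--             )
--
--         current_index += number_fragments
--
--     return smiles_list, groups
-- ===== SOURCE B (Python) =====
-- from typing import List, Tuple
--
-- def fragment_group(
--     compounds: List[str], offset: int
-- ) -> Tuple[List[str], List[List[int]]]:
--     # Different strategy: flatten everything into one stream of fragments, each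
--     # tagged with the index of the compound it came from, then recover the groups
--     # by run-length grouping of the tags over the flat stream (a tag change marks
--     # a compound boundary); no per-compound fragment counts or start offsets are
--     # ever computed.
--     tagged = [(j, m) for j, c in enumerate(compounds) for m in c.split(".")]
--     smiles_list = [m for _, m in tagged]
--
--     groups: List[List[int]] = []
--     run: List[int] = []
--     prev = None
--     for i, (j, _) in enumerate(tagged):
--         if j != prev:
--             if len(run) > 1:
--                 groups.append(run)
--             run = []
--             prev = j
--         run.append(offset + i)
--     if len(run) > 1:
--         groups.append(run)
--     return smiles_list, groups
-- ===== Notes on version B (the rewrite author's own statement) =====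
-- stated objective: alternative
-- what changed: Replaces A's per-compound loop that threads a running start index and emits a range per multi-fragment compound with a flat tagged-stream computation: every fragment is tagged with its compound index in one flattened list, and the groups are recovered by run-length grouping of the tags (a tag change marks a compound boundary), so no fragment counts or start offsets are ever computed.
import Mathlib
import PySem

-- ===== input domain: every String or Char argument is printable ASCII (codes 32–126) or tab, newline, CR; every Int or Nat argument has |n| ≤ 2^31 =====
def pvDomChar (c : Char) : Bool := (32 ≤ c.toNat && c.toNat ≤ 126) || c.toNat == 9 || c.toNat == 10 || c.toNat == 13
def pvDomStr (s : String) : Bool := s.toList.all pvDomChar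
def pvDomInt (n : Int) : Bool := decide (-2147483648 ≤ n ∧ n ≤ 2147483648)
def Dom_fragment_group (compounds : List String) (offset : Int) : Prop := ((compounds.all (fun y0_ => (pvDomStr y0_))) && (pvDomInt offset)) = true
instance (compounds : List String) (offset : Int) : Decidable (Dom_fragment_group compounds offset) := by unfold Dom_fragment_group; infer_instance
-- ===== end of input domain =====

-- B replaces A's per-compound pass (threaded running index + per-compound ranges) by a flat
-- tag-and-group-by computation: flatten all fragments into one compound-index-tagged stream and
-- recover groups by run-length grouping of the tags; objective: alternative decomposition, same cost class.


-- c.split(".") — sep is the literal nonempty ".", so split? always returns some (exact)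
def pvSplitDot (c : String) : List String := (PySem.Str.split? c ".").getD []

-- ===== PORT A =====
def fragment_group (compounds : List String) (offset : Int) : List String × List (List Int) :=
  let st := compounds.foldl
    (fun (st : List String × List (List Int) × Int) c =>
      let molecules := pvSplitDot c
      let smiles_list := st.1 ++ molecules
      let number_fragments : Int := molecules.length
      let groups :=
        if number_fragments > 1 then
          st.2.1 ++ [PySem.List.pyRange st.2.2 (st.2.2 + number_fragments) 1]
        else st.2.1
      (smiles_list, groups, st.2.2 + number_fragments))
    ([], [], offset)
  (st.1, st.2.1)

-- ===== PORT B =====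
-- 'if len(run) > 1: groups.append(run)' (the flush in B's loop body and after the loop)
def pvFlush (gs : List (List Int)) (run : List Int) : List (List Int) :=
  if run.length > 1 then gs ++ [run] else gs

-- the body of B's 'for i, (j, _) in enumerate(tagged)' loop, state = (groups, run, prev)
def pvStepB (offset : Int) (st : List (List Int) × List Int × Option Int)
    (it : Int × (Int × String)) : List (List Int) × List Int × Option Int :=
  if st.2.2 ≠ some it.2.1 then
    (pvFlush st.1 st.2.1, [offset + it.1], some it.2.1)
  else
    (st.1, st.2.1 ++ [offset + it.1], st.2.2)

def fragment_group_alt (compounds : List String) (offset : Int) : List String × List (List Int) :=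
  let tagged := (PySem.List.enumerate compounds).flatMap
    (fun jc => (pvSplitDot jc.2).map (fun m => (jc.1, m)))
  let smiles_list := tagged.map (fun t => t.2)
  let st := (PySem.List.enumerate tagged).foldl (pvStepB offset) ([], [], none)
  (smiles_list, pvFlush st.1 st.2.1)

-- ===== PRECONDITION & SPEC =====
def Spec_fragment_group (compounds : List String) (offset : Int) (out : List String × List (List Int)) : Prop := out = fragment_group_alt compounds offset
instance (compounds : List String) (offset : Int) (out : List String × List (List Int)) : Decidable (Spec_fragment_group compounds offset out) := by unfold Spec_fragment_group; infer_instance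

-- ===== CLAIM (what is proved, stated in full; the proofs are below) =====
def Claim_equal_fragment_group : Prop := ∀ (compounds : List String) (offset : Int), Dom_fragment_group compounds offset → Spec_fragment_group compounds offset (fragment_group compounds offset)

-- ===== LEMMAS AND PROOFS =====

-- str.split with a nonempty separator never returns an empty list
lemma splitOn_go_ne_nil (sep : List Char) : ∀ fuel l cur acc,
    PySem.Chars.splitOn.go sep fuel l cur acc ≠ [] := by
  intro fuel
  induction fuel with
  | zero => intro l cur acc; simp [PySem.Chars.splitOn.go]
  | succ f ih =>
    intro l cur acc
    cases l with
    | nil => simp [PySem.Chars.splitOn.go]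
    | cons c rest =>
      rw [PySem.Chars.splitOn.go]
      split_ifs with h
      · exact ih _ _ _
      · exact ih _ _ _

lemma pvSplitDot_ne_nil (c : String) : pvSplitDot c ≠ [] := by
  simp [pvSplitDot, PySem.Str.split?, PySem.Chars.split?, PySem.Chars.splitOn]
  exact splitOn_go_ne_nil _ _ _ _ _

-- the tagged flat stream, starting at compound index j0 (fragment_group_alt uses j0 = 0)
def tagT (j0 : Int) (cs : List String) : List (Int × String) :=
  (PySem.List.enumerate cs j0).flatMap (fun jc => (pvSplitDot jc.2).map (fun m => (jc.1, m)))

-- A's groups, as a recursive function (the common reference value)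
def AgroupsRef : List String → Int → List (List Int)
  | [], _ => []
  | c :: cs, idx =>
      (if ((pvSplitDot c).length : Int) > 1 then
        [PySem.List.pyRange idx (idx + ((pvSplitDot c).length : Int)) 1] else [])
      ++ AgroupsRef cs (idx + ((pvSplitDot c).length : Int))

lemma tagT_nil (j0 : Int) : tagT j0 [] = [] := by
  simp [tagT, PySem.List.enumerate_nil]

lemma tagT_cons (j0 : Int) (c : String) (cs : List String) :
    tagT j0 (c :: cs) = (pvSplitDot c).map (fun m => (j0, m)) ++ tagT (j0 + 1) cs := by
  simp [tagT, PySem.List.enumerate_cons]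

lemma map_snd_tagT (j0 : Int) (cs : List String) :
    (tagT j0 cs).map (fun t => t.2) = cs.flatMap pvSplitDot := by
  induction cs generalizing j0 with
  | nil => simp [tagT_nil]
  | cons c cs ih => simp [tagT_cons, ih]

lemma pvFlush_eq (gs : List (List Int)) (run : List Int) :
    pvFlush gs run = gs ++ (if run.length > 1 then [run] else []) := by
  unfold pvFlush; split_ifs <;> simp

-- folding B's step over the tail of one block (same tag j, prev already = some j)
lemma foldB_same (offset j : Int) : ∀ (b : List String) (gs : List (List Int))
    (run : List Int) (i0 : Int),
    (PySem.List.enumerate (b.map (fun m => (j, m))) i0).foldl (pvStepB offset) (gs, run, some j)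
      = (gs, run ++ PySem.List.pyRange (offset + i0) (offset + i0 + b.length) 1, some j) := by
  intro b
  induction b with
  | nil =>
    intro gs run i0
    rw [PySem.List.pyRange_one_eq_nil (by simp)]
    simp [PySem.List.enumerate_nil]
  | cons m b ih =>
    intro gs run i0
    rw [List.map_cons, PySem.List.enumerate_cons, List.foldl_cons]
    have hstep : pvStepB offset (gs, run, some j) (i0, (j, m))
        = (gs, run ++ [offset + i0], some j) := by
      simp [pvStepB]
    rw [hstep, ih]
    simp only [Prod.mk.injEq]
    refine ⟨trivial, ?_, trivial⟩
    simp only [List.length_cons]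
    push_cast
    have e4 : offset + (i0 + 1) + (b.length : Int) = offset + i0 + ((b.length : Int) + 1) := by ring
    have e5 : offset + (i0 + 1) = offset + i0 + 1 := by ring
    have hr : PySem.List.pyRange (offset + i0) (offset + i0 + ((b.length : Int) + 1)) 1
        = (offset + i0) :: PySem.List.pyRange (offset + i0 + 1) (offset + i0 + ((b.length : Int) + 1)) 1 :=
      PySem.List.pyRange_one_cons (by omega)
    rw [e4, e5, hr]
    simp

-- folding B's step over one whole nonempty block with a fresh prev tag
lemma foldB_block (offset j : Int) (b : List String) (hb : b ≠ [])
    (gs : List (List Int)) (run : List Int) (prev : Option Int) (hprev : prev ≠ some j)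
    (i0 : Int) :
    (PySem.List.enumerate (b.map (fun m => (j, m))) i0).foldl (pvStepB offset) (gs, run, prev)
      = (pvFlush gs run, PySem.List.pyRange (offset + i0) (offset + i0 + b.length) 1, some j) := by
  cases b with
  | nil => exact absurd rfl hb
  | cons m b =>
    rw [List.map_cons, PySem.List.enumerate_cons, List.foldl_cons]
    have hstep : pvStepB offset (gs, run, prev) (i0, (j, m))
        = (pvFlush gs run, [offset + i0], some j) := by
      simp [pvStepB, hprev]
    rw [hstep, foldB_same]
    simp only [Prod.mk.injEq]
    refine ⟨trivial, ?_, trivial⟩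
    simp only [List.length_cons]
    push_cast
    have e4 : offset + (i0 + 1) + (b.length : Int) = offset + i0 + ((b.length : Int) + 1) := by ring
    have e5 : offset + (i0 + 1) = offset + i0 + 1 := by ring
    have hr : PySem.List.pyRange (offset + i0) (offset + i0 + ((b.length : Int) + 1)) 1
        = (offset + i0) :: PySem.List.pyRange (offset + i0 + 1) (offset + i0 + ((b.length : Int) + 1)) 1 :=
      PySem.List.pyRange_one_cons (by omega)
    rw [e4, e5, hr]
    simp

-- the main B invariant: flushing the fold over the tagged stream yields A's groups
lemma foldB_main (offset : Int) : ∀ (cs : List String) (j0 i0 : Int)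
    (gs : List (List Int)) (run : List Int) (prev : Option Int),
    (∀ p, prev = some p → p < j0) →
    (let st := (PySem.List.enumerate (tagT j0 cs) i0).foldl (pvStepB offset) (gs, run, prev)
     pvFlush st.1 st.2.1) = pvFlush gs run ++ AgroupsRef cs (offset + i0) := by
  intro cs
  induction cs with
  | nil => intro j0 i0 gs run prev _; simp [tagT_nil, PySem.List.enumerate_nil, AgroupsRef]
  | cons c cs ih =>
    intro j0 i0 gs run prev hfresh
    rw [tagT_cons, PySem.List.enumerate_append, List.foldl_append]
    rw [foldB_block offset j0 (pvSplitDot c) (pvSplitDot_ne_nil c) gs run prev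
      (by intro h; have := hfresh j0 h; omega) i0]
    have hfresh' : ∀ p, (some j0 : Option Int) = some p → p < j0 + 1 := by
      intro p hp; cases hp; omega
    have := ih (j0 + 1) (i0 + ((pvSplitDot c).map (fun m => (j0, m))).length)
      (pvFlush gs run) (PySem.List.pyRange (offset + i0) (offset + i0 + (pvSplitDot c).length) 1)
      (some j0) hfresh'
    simp only at this ⊢
    rw [this]
    rw [pvFlush_eq (pvFlush gs run)]
    rw [List.append_assoc]
    congr 1
    show _ = AgroupsRef (c :: cs) (offset + i0)
    rw [AgroupsRef]
    have hlen : (PySem.List.pyRange (offset + i0) (offset + i0 + (pvSplitDot c).length) 1).length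
        = (pvSplitDot c).length := by
      rw [PySem.List.length_pyRange_one]; omega
    rw [hlen]
    congr 1
    · split_ifs with h1 h2 h2 <;> first | rfl | (exfalso; push_cast at *; omega)
    · congr 1
      simp only [List.length_map]
      ring

-- A's fold, with a general accumulator, against the reference value
lemma foldA_eq : ∀ (cs : List String) (sl : List String) (gs : List (List Int)) (idx : Int),
    cs.foldl
      (fun (st : List String × List (List Int) × Int) c =>
        let molecules := pvSplitDot c
        let smiles_list := st.1 ++ molecules
        let number_fragments : Int := molecules.length
        let groups :=
          if number_fragments > 1 then
            st.2.1 ++ [PySem.List.pyRange st.2.2 (st.2.2 + number_fragments) 1]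
          else st.2.1
        (smiles_list, groups, st.2.2 + number_fragments))
      (sl, gs, idx)
    = (sl ++ cs.flatMap pvSplitDot, gs ++ AgroupsRef cs idx,
       idx + ((cs.flatMap pvSplitDot).length : Int)) := by
  intro cs
  induction cs with
  | nil => intro sl gs idx; simp [AgroupsRef]
  | cons c cs ih =>
    intro sl gs idx
    simp only [List.foldl_cons]
    rw [ih]
    rw [AgroupsRef]
    split_ifs with h
    · simp only [List.flatMap_cons, List.append_assoc, List.length_append, Prod.mk.injEq]
      refine ⟨trivial, by simp, by push_cast; ring⟩
    · simp only [List.flatMap_cons, List.append_assoc, List.length_append, Prod.mk.injEq]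
      refine ⟨trivial, by simp, by push_cast; ring⟩

-- ===== VERDICT (by name: the statement is the Claim_ definition above) =====
theorem fragment_group_spec : Claim_equal_fragment_group := by
  intro compounds offset _
  show fragment_group compounds offset = fragment_group_alt compounds offset
  simp only [fragment_group, fragment_group_alt]
  rw [foldA_eq]
  have hmain := foldB_main offset compounds 0 0 [] [] none (by intro p h; cases h)
  simp only [tagT] at hmain
  simp only at hmain ⊢
  rw [hmain]
  simp only [Prod.mk.injEq]
  constructor
  · rw [← map_snd_tagT 0 compounds, tagT]
    simp
  · simp [pvFlush]
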